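-- pv_equiv track=rewrite | github.com/YeobKim/Algorithm-Study | YBM_COS_Pro1/2_6.py | solution
-- ===== SOURCE A (Python) =====
-- def solution(commands):
--     # 여기에 코드를 작성해주세요.
--     answer = [0, 0]
--
--     # commands에서 들어오는 방향과 방향에 대한 x,y의 벡터값을 정의
--     direc_alpha = ['L', 'R', 'U', 'D']
--     dx = [-1, 1, 0, 0]
--     dy = [0, 0, 1, -1]
--
--     # commands의 문자들을 하나씩 보면서
--     for com in commands:
--         for i in range(len(direc_alpha)):
--             # 일치할 때의 direc_alpha의 index값을 사용할 수 있도록 함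
--             if com == direc_alpha[i]:
--                # index값에 dx, dy를 맵핑해두었기 때문에 다음과 같이 기존에 있던 answer의 값에 더해서 계속 값이 누적될 수 있도록 함
--                answer[0] += dx[i]
--                answer[1] += dy[i]
--
--     return answer
-- ===== SOURCE B (Python) =====
-- from collections import Counter
--
-- def solution(commands):
--     c = Counter(commands)
--     return [c['R'] - c['L'], c['U'] - c['D']]
-- ===== Notes on version B (the rewrite author's own statement) =====
-- stated objective: simpler
-- what changed: Replaced the per-command accumulation over a parallel dx/dy lookup table with a single Counter tally followed by a closed-form difference [R-L, U-D] (one C-level tally pass instead of a Python inner loop per command).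
import Mathlib
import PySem

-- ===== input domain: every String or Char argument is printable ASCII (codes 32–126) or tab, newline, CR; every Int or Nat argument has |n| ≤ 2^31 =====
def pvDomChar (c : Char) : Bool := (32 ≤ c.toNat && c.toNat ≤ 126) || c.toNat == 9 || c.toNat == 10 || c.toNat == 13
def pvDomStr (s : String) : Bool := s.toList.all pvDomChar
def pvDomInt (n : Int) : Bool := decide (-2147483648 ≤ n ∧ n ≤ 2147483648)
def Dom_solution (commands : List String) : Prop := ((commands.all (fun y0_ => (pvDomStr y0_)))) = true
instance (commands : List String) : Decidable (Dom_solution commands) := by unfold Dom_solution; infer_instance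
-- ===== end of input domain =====

-- B replaces A's per-command dx/dy table accumulation with a Counter tally and the closed form [R-L, U-D] (simpler).
-- ===== PORT A =====
def solutionStep (a : Int × Int) (com : String) : Int × Int :=
  let direc_alpha : List String := ["L", "R", "U", "D"]
  let dx : List Int := [-1, 1, 0, 0]
  let dy : List Int := [0, 0, 1, -1]
  (PySem.List.pyRange 0 4 1).foldl
    (fun a i =>
      if com = direc_alpha.getD i.toNat "" then
        (a.1 + dx.getD i.toNat 0, a.2 + dy.getD i.toNat 0)
      else a) a

def solution (commands : List String) : List Int :=
  let answer := commands.foldl solutionStep (0, 0)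
  [answer.1, answer.2]

-- ===== PORT B =====
def solution_alt (commands : List String) : List Int :=
  let c := PySem.Dict.counter commands
  [c.getD "R" 0 - c.getD "L" 0, c.getD "U" 0 - c.getD "D" 0]

-- ===== PRECONDITION & SPEC =====
def Spec_solution (commands : List String) (out : List Int) : Prop := out = solution_alt commands
instance (commands : List String) (out : List Int) : Decidable (Spec_solution commands out) := by unfold Spec_solution; infer_instance

-- ===== CLAIM (what is proved, stated in full; the proofs are below) =====
def Claim_equal_solution : Prop := ∀ (commands : List String), Dom_solution commands → Spec_solution commands (solution commands)

-- ===== LEMMAS AND PROOFS =====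
theorem solutionStep_eq (a : Int × Int) (com : String) :
    solutionStep a com =
      (a.1 + ((if com = "R" then 1 else 0) - (if com = "L" then 1 else 0)),
       a.2 + ((if com = "U" then 1 else 0) - (if com = "D" then 1 else 0))) := by
  have h : PySem.List.pyRange 0 4 1 = [0, 1, 2, 3] := by decide
  simp only [solutionStep, h, List.foldl]
  by_cases hL : com = "L" <;> by_cases hR : com = "R" <;>
    by_cases hU : com = "U" <;> by_cases hD : com = "D" <;>
    simp_all <;> omega

theorem solution_foldl (cs : List String) (a : Int × Int) :
    cs.foldl solutionStep a =
      (a.1 + ((cs.count "R" : Int) - cs.count "L"),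
       a.2 + ((cs.count "U" : Int) - cs.count "D")) := by
  induction cs generalizing a with
  | nil => simp
  | cons c t ih =>
    simp only [List.foldl_cons, ih, solutionStep_eq, List.count_cons]
    by_cases hL : c = "L" <;> by_cases hR : c = "R" <;>
      by_cases hU : c = "U" <;> by_cases hD : c = "D" <;>
      simp_all <;> push_cast <;> omega

-- ===== VERDICT (by name: the statement is the Claim_ definition above) =====
theorem solution_spec : Claim_equal_solution := by
  intro commands _
  show _ = _
  simp [solution, solution_alt, solution_foldl, PySem.Dict.getD_counter]
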